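-- pv_equiv track=rewrite | github.com/Jake-Song/RAG-end2end | test/test_conflict_matrix.py | conflict_matrix
-- ===== SOURCE A (Python) =====
-- def conflict_matrix(retrieved_page_number, reference_page_number):
--     true_positives = 0
--     false_positives = 0
--     false_negatives = 0
--     for i, page in enumerate(retrieved_page_number):
--         if page in reference_page_number:
--             true_positives += 1
--         elif i <= len(reference_page_number)-1 and page not in reference_page_number:
--             false_positives += 1
--             false_negatives += 1
--         elif i > len(reference_page_number)-1 and page not in reference_page_number:
--             false_positives += 1
--
--     return true_positives, false_positives, false_negatives
-- ===== SOURCE B (Python) =====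
-- def conflict_matrix(retrieved_page_number, reference_page_number):
--     tp = sum(1 for page in retrieved_page_number if page in reference_page_number)
--     fp = len(retrieved_page_number) - tp
--     fn = sum(1 for page in retrieved_page_number[:len(reference_page_number)]
--              if page not in reference_page_number)
--     return tp, fp, fn
-- ===== Notes on version B (the rewrite author's own statement) =====
-- stated objective: simpler
-- what changed: Replaces A's three-branch indexed loop with one membership count: fp is derived arithmetically as len(retrieved)-tp (every non-matching page increments FP in A), and fn is a separate count of non-matching pages among the first len(reference) retrieved pages, eliminating the index comparison branches.
import Mathlib
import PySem

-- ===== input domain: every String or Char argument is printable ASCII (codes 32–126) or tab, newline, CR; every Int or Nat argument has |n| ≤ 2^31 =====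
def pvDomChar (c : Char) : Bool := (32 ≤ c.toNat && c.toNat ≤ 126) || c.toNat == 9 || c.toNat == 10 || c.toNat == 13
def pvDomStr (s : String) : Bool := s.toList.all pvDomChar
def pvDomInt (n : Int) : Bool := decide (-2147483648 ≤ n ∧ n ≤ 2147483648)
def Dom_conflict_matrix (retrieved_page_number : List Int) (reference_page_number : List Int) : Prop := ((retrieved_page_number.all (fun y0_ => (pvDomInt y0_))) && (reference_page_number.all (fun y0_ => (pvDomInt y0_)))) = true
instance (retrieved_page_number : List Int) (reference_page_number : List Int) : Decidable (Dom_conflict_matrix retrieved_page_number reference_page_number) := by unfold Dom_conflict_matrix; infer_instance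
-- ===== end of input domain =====

-- B replaces A's three-branch indexed loop by a membership count, fp = len - tp, and a count over the first len(reference) elements (simpler decomposition, same cost).


-- ===== PORT A =====
-- the body of A's for-loop, one step: dispatch on the three elif branches
def cmStep (reference_page_number : List Int) (acc : Int × Int × Int) (ip : Int × Int) : Int × Int × Int :=
  let (tp, fp, fn) := acc
  let (i, page) := ip
  if page ∈ reference_page_number then
    (tp + 1, fp, fn)
  else if i ≤ (reference_page_number.length : Int) - 1 ∧ page ∉ reference_page_number then
    (tp, fp + 1, fn + 1)
  else if i > (reference_page_number.length : Int) - 1 ∧ page ∉ reference_page_number then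
    (tp, fp + 1, fn)
  else
    (tp, fp, fn)

def conflict_matrix (retrieved_page_number : List Int) (reference_page_number : List Int) : Int × Int × Int :=
  (PySem.List.enumerate retrieved_page_number 0).foldl (cmStep reference_page_number) (0, 0, 0)

-- ===== PORT B =====
def conflict_matrix_alt (retrieved_page_number : List Int) (reference_page_number : List Int) : Int × Int × Int :=
  let tp : Int := (retrieved_page_number.countP (fun page => page ∈ reference_page_number) : Nat)
  let fp : Int := (retrieved_page_number.length : Int) - tp
  let fn : Int := ((PySem.List.slice retrieved_page_number none (some (reference_page_number.length : Int))).countP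
      (fun page => page ∉ reference_page_number) : Nat)
  (tp, fp, fn)

-- ===== PRECONDITION & SPEC =====
def Spec_conflict_matrix (retrieved_page_number : List Int) (reference_page_number : List Int) (out : Int × Int × Int) : Prop := out = conflict_matrix_alt retrieved_page_number reference_page_number
instance (retrieved_page_number : List Int) (reference_page_number : List Int) (out : Int × Int × Int) : Decidable (Spec_conflict_matrix retrieved_page_number reference_page_number out) := by unfold Spec_conflict_matrix; infer_instance

-- ===== CLAIM (what is proved, stated in full; the proofs are below) =====
def Claim_equal_conflict_matrix : Prop := ∀ (retrieved_page_number : List Int) (reference_page_number : List Int), Dom_conflict_matrix retrieved_page_number reference_page_number → Spec_conflict_matrix retrieved_page_number reference_page_number (conflict_matrix retrieved_page_number reference_page_number)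

-- ===== LEMMAS AND PROOFS =====

-- A's loop started at index s with accumulator (tp, fp, fn): tp gains the membership
-- count, fp the non-membership count, fn the non-membership count over the first
-- (len ref - s) elements.
theorem conflict_matrix_loop (ref : List Int) :
    ∀ (r : List Int) (s : Nat) (tp fp fn : Int),
      (PySem.List.enumerate r (s : Int)).foldl (cmStep ref) (tp, fp, fn)
      = (tp + (r.countP (fun page => page ∈ ref) : Nat),
         fp + (r.countP (fun page => page ∉ ref) : Nat),
         fn + ((r.take (ref.length - s)).countP (fun page => page ∉ ref) : Nat)) := by
  intro r
  induction r with
  | nil => intro s tp fp fn; simp [PySem.List.enumerate_nil]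
  | cons x xs ih =>
    intro s tp fp fn
    rw [PySem.List.enumerate_cons, List.foldl_cons]
    have h1 : ((s : Int) + 1) = ((s + 1 : Nat) : Int) := by push_cast; ring
    rw [h1]
    by_cases hx : x ∈ ref
    · have hstep : cmStep ref (tp, fp, fn) ((s : Int), x) = (tp + 1, fp, fn) := by
        simp [cmStep, hx]
      rw [hstep, ih (s + 1) (tp + 1) fp fn]
      by_cases hs : s < ref.length
      · have ht : ref.length - s = (ref.length - (s + 1)) + 1 := by omega
        rw [ht, List.take_succ_cons]
        simp only [Prod.mk.injEq, List.countP_cons]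
        refine ⟨?_, ?_, ?_⟩ <;> (simp [hx]; try ring)
      · have ht : ref.length - s = 0 := by omega
        have ht' : ref.length - (s + 1) = 0 := by omega
        rw [ht, ht']
        simp only [Prod.mk.injEq, List.countP_cons, List.take_zero]
        refine ⟨?_, ?_, ?_⟩ <;> (simp [hx]; try ring)
    · by_cases hs : s < ref.length
      · have hc : (s : Int) ≤ (ref.length : Int) - 1 := by omega
        have hstep : cmStep ref (tp, fp, fn) ((s : Int), x) = (tp, fp + 1, fn + 1) := by
          simp [cmStep, hx, hc]
        rw [hstep, ih (s + 1) tp (fp + 1) (fn + 1)]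
        have ht : ref.length - s = (ref.length - (s + 1)) + 1 := by omega
        rw [ht, List.take_succ_cons]
        simp only [Prod.mk.injEq, List.countP_cons]
        refine ⟨?_, ?_, ?_⟩ <;> (simp [hx]; try ring)
      · have hle : ¬ ((s : Int) ≤ (ref.length : Int) - 1) := by omega
        have hgt : (s : Int) > (ref.length : Int) - 1 := by omega
        have hstep : cmStep ref (tp, fp, fn) ((s : Int), x) = (tp, fp + 1, fn) := by
          simp [cmStep, hx, hle, hgt]
        rw [hstep, ih (s + 1) tp (fp + 1) fn]
        have ht : ref.length - s = 0 := by omega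
        have ht' : ref.length - (s + 1) = 0 := by omega
        rw [ht, ht']
        simp only [Prod.mk.injEq, List.countP_cons, List.take_zero]
        refine ⟨?_, ?_, ?_⟩ <;> (simp [hx]; try ring)

-- ===== VERDICT (by name: the statement is the Claim_ definition above) =====
theorem conflict_matrix_spec : Claim_equal_conflict_matrix := by
  intro r ref _
  unfold Spec_conflict_matrix conflict_matrix conflict_matrix_alt
  have h := conflict_matrix_loop ref r 0 0 0 0
  rw [Nat.cast_zero] at h
  rw [h, PySem.List.slice_to_natCast]
  have hcount := List.length_eq_countP_add_countP (fun page => decide (page ∈ ref)) (l := r)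
  have hco : r.countP (fun a => ¬ decide (a ∈ ref) = true) = r.countP (fun page => decide (page ∉ ref)) := by
    apply List.countP_congr; intro a _; simp
  simp only [Nat.sub_zero, zero_add]
  refine Prod.ext rfl (Prod.ext ?_ rfl)
  dsimp only
  omega
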